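-- pv_equiv track=rewrite | github.com/Abdiiir/AI_Assignment_2 | convertToCnf.py | eliminateBiconditional
-- ===== SOURCE A (Python) =====
-- def findMiddleBrackets(sentence):
--
--     idxStart = sentence.rfind("(")
--
--     idxEnd = 0
--     for i in range(idxStart, len(sentence)):
--         if sentence[i] == ")":
--             idxEnd = i
--             break
--
--     left = sentence[:idxStart]
--     middle = sentence[idxStart+1:idxEnd]
--     right = sentence[idxEnd+1:]
--     return left, middle, right
--
-- def eliminateBiconditional(sentence):
--     while "(" in sentence:
--         left, middle, right = findMiddleBrackets(sentence)
--
--         # Checks if there are any Bicoditionals in inside bracket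
--         ind = middle.find("<->")
--         if ind == -1:
--             sentence = left + "[" + middle + "]" + right
--             continue
--
--         # Splits into left and right side of biconditional
--         # And then creates new sentence with the biconditional eliminated
--         middleLeft = middle[:ind]
--         middleRight = middle[ind+3:]
--         sentence = left +"["+ middleLeft +"->"+ middleRight +"]"+"&"+"["+ middleRight +"->"+ middleLeft +"]"+ right
--
--     sentence = sentence.replace("[","(").replace("]",")")
--     return sentence
-- ===== SOURCE B (Python) =====
-- # One-pass stack parse (A rescans the whole sentence for every bracket); keeps
-- # A's placeholder convention: '[' / ']' (also literal ones in the input) come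
-- # out as '(' / ')'.
--
-- def _transform(m):
--     i = m.find("<->")
--     if i == -1:
--         return "[" + m + "]"
--     left, right = m[:i], m[i + 3:]
--     return "[" + left + "->" + right + "]&[" + right + "->" + left + "]"
--
-- def eliminateBiconditional(sentence):
--     stack = [[]]
--     for ch in sentence:
--         if ch == "(":
--             stack.append([])
--         elif ch == ")" and len(stack) > 1:
--             m = stack.pop()
--             stack[-1].append(_transform("".join(m)))
--         else:
--             stack[-1].append(ch)
--     while len(stack) > 1:
--         m = stack.pop()
--         stack[-1].append("(" + "".join(m))
--     out = "".join(stack[0])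
--     return out.replace("[", "(").replace("]", ")")
-- ===== Notes on version B (the rewrite author's own statement) =====
-- stated objective: faster
-- what changed: A repeatedly rescans the whole sentence (rfind, a ')' scan, slicing and full-string rebuild) once per bracket; B parses the sentence once with a stack of open-bracket buffers, transforming each bracket body as its ')' arrives.
-- intended difference: On sentences whose leading '(' is never closed (all other '(' matched), A returns '()' + rest — an accident of the empty slice s[1:0] in its final iteration — while B keeps the unmatched '(' literally and returns '(' + rest, the intended value. — e.g. on eliminateBiconditional("(a"): A returns "()a", B returns "(a"
import Mathlib
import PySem

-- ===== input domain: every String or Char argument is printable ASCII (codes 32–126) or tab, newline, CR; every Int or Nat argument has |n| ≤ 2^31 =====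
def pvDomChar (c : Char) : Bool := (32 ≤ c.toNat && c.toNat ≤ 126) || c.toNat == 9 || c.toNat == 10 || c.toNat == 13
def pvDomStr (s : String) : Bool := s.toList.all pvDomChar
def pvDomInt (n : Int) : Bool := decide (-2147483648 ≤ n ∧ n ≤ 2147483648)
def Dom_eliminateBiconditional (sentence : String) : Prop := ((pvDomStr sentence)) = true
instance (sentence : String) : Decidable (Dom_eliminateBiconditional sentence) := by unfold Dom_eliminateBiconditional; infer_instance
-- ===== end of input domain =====

-- B replaces A's repeated innermost-bracket rescans by a single stack parse; it keeps
-- A's placeholder convention ('[' / ']' — also literal ones in the input — come out as '(' / ')').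

-- ===== PORT A =====

-- the 'for i in range(idxStart, len(sentence)): if sentence[i] == ")": idxEnd = i; break' loop
-- (scans the suffix starting at absolute index i; idxEnd stays 0 when no ')' is found)
def pvAFindIdxEnd : List Char → Nat → Nat
  | [], _ => 0
  | c :: t, i => if c = ')' then i else pvAFindIdxEnd t (i + 1)

-- findMiddleBrackets; called only when '(' ∈ s (the loop guard), so rfind ≥ 0 and .toNat is exact
def pvFindMiddleBrackets (s : List Char) : List Char × List Char × List Char :=
  let idxStart : Int := PySem.Chars.rfind s ['(']
  let idxEnd : Int := (pvAFindIdxEnd (s.drop idxStart.toNat) idxStart.toNat : Nat)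
  let left := PySem.List.slice s none (some idxStart)
  let middle := PySem.List.slice s (some (idxStart + 1)) (some idxEnd)
  let right := PySem.List.slice s (some (idxEnd + 1)) none
  (left, middle, right)

-- the 'while "(" in sentence' loop; fuel = number of '(' (each iteration consumes exactly one '(')
def pvALoop : Nat → List Char → List Char
  | 0, s => s
  | fuel + 1, s =>
    if PySem.Chars.isIn ['('] s then
      let t := pvFindMiddleBrackets s
      let left := t.1
      let middle := t.2.1
      let right := t.2.2
      let ind : Int := PySem.Chars.find middle ['<','-','>']
      if ind = -1 then
        pvALoop fuel (left ++ '[' :: middle ++ [']'] ++ right)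
      else
        let middleLeft := PySem.List.slice middle none (some ind)
        let middleRight := PySem.List.slice middle (some (ind + 3)) none
        pvALoop fuel (left ++ '[' :: middleLeft ++ ['-','>'] ++ middleRight ++ [']'] ++ ['&'] ++ '[' :: middleRight ++ ['-','>'] ++ middleLeft ++ [']'] ++ right)
    else s

def eliminateBiconditional (sentence : String) : String :=
  let res := pvALoop (sentence.toList.count '(') sentence.toList
  String.ofList (PySem.Chars.replace (PySem.Chars.replace res ['['] ['(']) [']'] [')'])

-- ===== PORT B =====

-- _transform: eliminate the first '<->' of a (paren-free) bracket body, placeholder brackets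
def pvTransform (m : List Char) : List Char :=
  let i : Int := PySem.Chars.find m ['<','-','>']
  if i = -1 then '[' :: m ++ [']']
  else
    let left := PySem.List.slice m none (some i)
    let right := PySem.List.slice m (some (i + 3)) none
    '[' :: left ++ ['-','>'] ++ right ++ [']','&','['] ++ right ++ ['-','>'] ++ left ++ [']']

-- one character of B's scan; the stack top is the head of the list
def pvBStep (st : List (List Char)) (c : Char) : List (List Char) :=
  if c = '(' then [] :: st
  else if c = ')' && st.length > 1 then
    match st with
    | m :: top :: rest => (top ++ pvTransform m) :: rest
    | _ => st
  else
    match st with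
    | top :: rest => (top ++ [c]) :: rest
    | [] => st

-- the 'while len(stack) > 1' tail loop: reattach unclosed frames literally
def pvCollapseGo : List Char → List (List Char) → List Char
  | m, [] => m
  | m, top :: rest => pvCollapseGo (top ++ '(' :: m) rest

def pvCollapse : List (List Char) → List Char
  | [] => []
  | m :: rest => pvCollapseGo m rest

def eliminateBiconditional_alt (sentence : String) : String :=
  let out := pvCollapse (sentence.toList.foldl pvBStep [[]])
  String.ofList (PySem.Chars.replace (PySem.Chars.replace out ['['] ['(']) [']'] [')'])

-- ===== PRECONDITION & SPEC =====

-- number of unclosed '(' in the standard left-to-right matching (a ')' closes the most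
-- recent still-open '(' if any; Nat subtraction clamps at 0 exactly as that 'if any')
def pvUnmatchedOpens (cs : List Char) : Nat :=
  cs.foldl (fun n c => if c = '(' then n + 1 else if c = ')' then n - 1 else n) 0

-- Pre_ excludes exactly the inputs on which A's while loop never terminates: a '(' at a
-- positive index with no ')' left to match it makes A rewrite forever (e.g. "b(a").
def Pre_eliminateBiconditional (sentence : String) : Prop :=
  pvUnmatchedOpens (sentence.toList.drop 1) = 0

instance (sentence : String) : Decidable (Pre_eliminateBiconditional sentence) := by
  unfold Pre_eliminateBiconditional; infer_instance

def pvWitness_eliminateBiconditional : String := "(a<->b)"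

-- On sentences whose leading '(' is never closed A returns "()" ++ rest (an accident of the
-- empty slice s[1:0]); B keeps the unmatched '(' literally and returns "(" ++ rest, the intended value.
def D_eliminateBiconditional (sentence : String) : Prop :=
  sentence.toList.take 1 = ['('] ∧ pvUnmatchedOpens sentence.toList ≠ 0

instance (sentence : String) : Decidable (D_eliminateBiconditional sentence) := by
  unfold D_eliminateBiconditional; infer_instance

def Spec_eliminateBiconditional (sentence : String) (out : String) : Prop :=
  ¬ D_eliminateBiconditional sentence → out = eliminateBiconditional_alt sentence

instance (sentence : String) (out : String) : Decidable (Spec_eliminateBiconditional sentence out) := by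
  unfold Spec_eliminateBiconditional; infer_instance

def pvDiffWitness_eliminateBiconditional : String := "(a"

def pvDiffWitnessOut_eliminateBiconditional : String × String := ("()a", "(a")

-- ===== CLAIM =====

def Claim_unchanged_eliminateBiconditional : Prop :=
  ∀ (sentence : String), Dom_eliminateBiconditional sentence → Pre_eliminateBiconditional sentence →
    Spec_eliminateBiconditional sentence (eliminateBiconditional sentence)

def Claim_changed_eliminateBiconditional : Prop :=
  Dom_eliminateBiconditional (pvDiffWitness_eliminateBiconditional) ∧
  Pre_eliminateBiconditional (pvDiffWitness_eliminateBiconditional) ∧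
  D_eliminateBiconditional (pvDiffWitness_eliminateBiconditional) ∧
  eliminateBiconditional (pvDiffWitness_eliminateBiconditional) = pvDiffWitnessOut_eliminateBiconditional.1 ∧
  eliminateBiconditional_alt (pvDiffWitness_eliminateBiconditional) = pvDiffWitnessOut_eliminateBiconditional.2 ∧
  pvDiffWitnessOut_eliminateBiconditional.1 ≠ pvDiffWitnessOut_eliminateBiconditional.2

def Claim_exact_eliminateBiconditional : Prop :=
  ∀ (sentence : String), Dom_eliminateBiconditional sentence → Pre_eliminateBiconditional sentence →
    D_eliminateBiconditional sentence →
    eliminateBiconditional sentence ≠ eliminateBiconditional_alt sentence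

-- ===== LEMMAS AND PROOFS =====


-- chars that neither open nor close a bracket (both A and B copy them verbatim)
def pvParenFree (cs : List Char) : Prop := ∀ c ∈ cs, c ≠ '(' ∧ c ≠ ')'

def pvUStep (n : Nat) (c : Char) : Nat :=
  if c = '(' then n + 1 else if c = ')' then n - 1 else n

def pvReplFun (c : Char) : Char := if c = '[' then '(' else if c = ']' then ')' else c

-- ---------- generic helpers ----------

lemma pv_isIn_of_mem (c : Char) (s : List Char) (h : c ∈ s) :
    PySem.Chars.isIn [c] s = true := by
  rcases List.append_of_mem h with ⟨l1, l2, rfl⟩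
  have hne : PySem.Chars.find (l1 ++ c :: l2) [c] ≠ -1 := by
    rw [PySem.Chars.find_ne_neg_one_iff]
    exact ⟨l1, l2, by simp⟩
  simp [PySem.Chars.isIn, bne_iff_ne, hne]

lemma pv_split_last (c : Char) (s : List Char) (h : c ∈ s) :
    ∃ L T, s = L ++ c :: T ∧ c ∉ T := by
  induction s with
  | nil => cases h
  | cons a t ih =>
    by_cases hm : c ∈ t
    · obtain ⟨L, T, rfl, hT⟩ := ih hm
      exact ⟨a :: L, T, rfl, hT⟩
    · rcases List.mem_cons.mp h with rfl | hmem
      · exact ⟨[], t, rfl, hm⟩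
      · exact absurd hmem hm

lemma pv_split_first (c : Char) (s : List Char) (h : c ∈ s) :
    ∃ M R, s = M ++ c :: R ∧ c ∉ M := by
  induction s with
  | nil => cases h
  | cons a t ih =>
    by_cases ha : c = a
    · exact ⟨[], t, by simp [ha], by simp⟩
    · rcases List.mem_cons.mp h with rfl | hmem
      · exact absurd rfl ha
      · obtain ⟨M, R, rfl, hM⟩ := ih hmem
        exact ⟨a :: M, R, rfl, by simp [ha, hM]⟩

-- ---------- A-side computation lemmas ----------

lemma pv_rfind_go_last (L T : List Char) (hT : '(' ∉ T) :
    ∀ k, L.length ≤ k → k ≤ (L ++ '(' :: T).length →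
      PySem.Chars.rfind.go (L ++ '(' :: T) ['('] k = (L.length : Int) := by
  intro k
  induction k with
  | zero =>
    intro h1 _
    have hL : L = [] := List.eq_nil_of_length_eq_zero (Nat.le_zero.mp h1)
    subst hL
    simp [PySem.Chars.rfind.go, List.isPrefixOf]
  | succ j ih =>
    intro h1 h2
    rcases Nat.lt_or_ge j L.length with hj | hj
    · -- L.length = j + 1 : the prefix test succeeds exactly here
      have hLen : L.length = j + 1 := by omega
      have hdrop : (L ++ '(' :: T).drop (j + 1) = '(' :: T := by
        rw [← hLen, List.drop_left]
      simp [PySem.Chars.rfind.go, hdrop, List.isPrefixOf, hLen]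
    · -- j + 1 > L.length : the dropped suffix lies inside T, which has no '('
      have hdrop : (L ++ '(' :: T).drop (j + 1) = T.drop (j - L.length) := by
        rw [List.drop_append]
        rw [List.drop_eq_nil_of_le (by omega), List.nil_append]
        have : j + 1 - L.length = (j - L.length) + 1 := by omega
        rw [this, List.drop_succ_cons]
      have hpre : (['('].isPrefixOf ((L ++ '(' :: T).drop (j + 1))) = false := by
        rw [hdrop]
        cases hT' : T.drop (j - L.length) with
        | nil => simp [List.isPrefixOf]
        | cons a t =>
          have ha : a ∈ T := List.mem_of_mem_drop (hT' ▸ List.mem_cons_self)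
          have : a ≠ '(' := fun e => hT (e ▸ ha)
          simp [List.isPrefixOf, Ne.symm this]
      simp only [PySem.Chars.rfind.go, hpre, Bool.false_eq_true, if_false]
      exact ih hj (by simpa using Nat.le_of_succ_le h2)

lemma pv_rfind_last (L T : List Char) (hT : '(' ∉ T) :
    PySem.Chars.rfind (L ++ '(' :: T) ['('] = (L.length : Int) := by
  unfold PySem.Chars.rfind
  exact pv_rfind_go_last L T hT _ (by simp) le_rfl

lemma pv_findIdxEnd_none (cs : List Char) (h : ')' ∉ cs) (i : Nat) :
    pvAFindIdxEnd cs i = 0 := by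
  induction cs generalizing i with
  | nil => rfl
  | cons a t ih =>
    have ha : a ≠ ')' := fun e => h (e ▸ List.mem_cons_self)
    simp only [pvAFindIdxEnd, ha, if_false]
    exact ih (fun hm => h (List.mem_cons_of_mem _ hm)) _

lemma pv_findIdxEnd_append (M R : List Char) (h : ')' ∉ M) (i : Nat) :
    pvAFindIdxEnd (M ++ ')' :: R) i = i + M.length := by
  induction M generalizing i with
  | nil => simp [pvAFindIdxEnd]
  | cons a t ih =>
    have ha : a ≠ ')' := fun e => h (e ▸ List.mem_cons_self)
    simp only [List.cons_append, pvAFindIdxEnd, ha, if_false]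
    rw [ih (fun hm => h (List.mem_cons_of_mem _ hm))]
    simp; omega

lemma pv_fmb (L M R : List Char) (hM : '(' ∉ M) (hMc : ')' ∉ M) (hR : '(' ∉ R) :
    pvFindMiddleBrackets (L ++ '(' :: M ++ ')' :: R) = (L, M, R) := by
  have hs : L ++ '(' :: M ++ ')' :: R = L ++ '(' :: (M ++ ')' :: R) := by simp
  rw [hs]
  have hT : '(' ∉ M ++ ')' :: R := by
    simp [List.mem_append, hM, hR]
  unfold pvFindMiddleBrackets
  rw [pv_rfind_last L (M ++ ')' :: R) hT]
  simp only [Int.toNat_natCast, List.drop_left]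
  have hfe : pvAFindIdxEnd ('(' :: (M ++ ')' :: R)) L.length = L.length + 1 + M.length := by
    simp only [pvAFindIdxEnd, if_neg (by decide : ¬ ('(' = ')'))]
    rw [pv_findIdxEnd_append M R hMc]
  rw [hfe]
  refine congrArg₂ Prod.mk ?_ (congrArg₂ Prod.mk ?_ ?_)
  · rw [PySem.List.slice_to_natCast]
    exact List.take_left
  · have h1 : (L.length : Int) + 1 = ((L.length + 1 : Nat) : Int) := by push_cast; ring
    rw [h1, PySem.List.slice_natCast]
    have hd : (L ++ '(' :: (M ++ ')' :: R)).drop (L.length + 1) = M ++ ')' :: R := by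
      rw [List.drop_append]
      rw [List.drop_eq_nil_of_le (by omega), List.nil_append]
      simp
    rw [hd]
    have h2 : L.length + 1 + M.length - (L.length + 1) = M.length := by omega
    rw [h2]
    exact List.take_left
  · have h1 : ((L.length + 1 + M.length : Nat) : Int) + 1 = ((L.length + 1 + M.length + 1 : Nat) : Int) := by
      push_cast; ring
    rw [h1, PySem.List.slice_from_natCast]
    rw [List.drop_append]
    rw [List.drop_eq_nil_of_le (by omega), List.nil_append]
    have h2 : L.length + 1 + M.length + 1 - L.length = M.length + 2 := by omega
    rw [h2]
    have h3 : ('(' :: (M ++ ')' :: R)).drop (M.length + 2) = (M ++ ')' :: R).drop (M.length + 1) := rfl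
    rw [h3, List.drop_append]
    rw [List.drop_eq_nil_of_le (by omega), List.nil_append]
    have h4 : M.length + 1 - M.length = 1 := by omega
    rw [h4, List.drop_succ_cons, List.drop_zero]

lemma pv_aloop_step (f : Nat) (L M R : List Char) (hM : '(' ∉ M) (hMc : ')' ∉ M) (hR : '(' ∉ R) :
    pvALoop (f + 1) (L ++ '(' :: M ++ ')' :: R) = pvALoop f (L ++ pvTransform M ++ R) := by
  have hmem : '(' ∈ L ++ '(' :: M ++ ')' :: R := by simp
  simp only [pvALoop, pv_isIn_of_mem '(' _ hmem, if_true, pv_fmb L M R hM hMc hR]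
  by_cases hfind : PySem.Chars.find M ['<','-','>'] = -1
  · simp only [hfind, if_true, pvTransform]
    congr 1; simp
  · simp only [hfind, if_false, pvTransform]
    congr 1; simp

lemma pv_aloop_open_only (f : Nat) (T : List Char) (hT : '(' ∉ T) (hTc : ')' ∉ T) :
    pvALoop (f + 1) ('(' :: T) = '[' :: ']' :: T := by
  have hmem : '(' ∈ '(' :: T := List.mem_cons_self
  simp only [pvALoop, pv_isIn_of_mem '(' _ hmem, if_true]
  have hrf : PySem.Chars.rfind ('(' :: T) ['('] = ((0 : Nat) : Int) :=
    pv_rfind_last [] T hT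
  have hfmb : pvFindMiddleBrackets ('(' :: T) = ([], [], T) := by
    unfold pvFindMiddleBrackets
    rw [hrf]
    simp only [Int.toNat_natCast, List.drop_zero]
    have hfe : pvAFindIdxEnd ('(' :: T) 0 = 0 := by
      simp only [pvAFindIdxEnd, if_neg (by decide : ¬ ('(' = ')'))]
      exact pv_findIdxEnd_none T hTc 1
    rw [hfe]
    refine congrArg₂ Prod.mk ?_ (congrArg₂ Prod.mk ?_ ?_)
    · rw [PySem.List.slice_to_natCast]; simp
    · have h1 : ((0 : Nat) : Int) + 1 = ((1 : Nat) : Int) := by norm_num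
      rw [h1, PySem.List.slice_natCast]
      simp
    · have h1 : ((0 : Nat) : Int) + 1 = ((1 : Nat) : Int) := by norm_num
      rw [h1, PySem.List.slice_from_natCast]
      simp
  rw [hfmb]
  have hfind : PySem.Chars.find ([] : List Char) ['<','-','>'] = -1 := by decide
  simp only [hfind, if_true]
  have : pvALoop f ('[' :: ']' :: T) = '[' :: ']' :: T := by
    cases f with
    | zero => rfl
    | succ g =>
      simp only [pvALoop]
      rw [if_neg]
      simp only [PySem.Chars.isIn, bne_iff_ne, ne_eq, not_not]
      rw [PySem.Chars.find_eq_neg_one_iff]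
      intro hinf
      have : '(' ∈ '[' :: ']' :: T := hinf.subset (by simp)
      simp [hT] at this
  simpa using this

-- ---------- B-side computation lemmas ----------

lemma pv_transform_chars (M : List Char) :
    ∀ c ∈ pvTransform M, c ∈ (['[', ']', '&', '-', '>'] : List Char) ∨ c ∈ M := by
  intro c hc
  unfold pvTransform at hc
  by_cases hfind : PySem.Chars.find M ['<','-','>'] = -1
  · rw [if_pos hfind] at hc
    simp only [List.mem_cons, List.mem_append, List.mem_singleton] at hc
    simp only [List.mem_cons, List.mem_singleton]
    tauto
  · have h0 : (0 : Int) ≤ PySem.Chars.find M ['<','-','>'] := by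
      have := PySem.Chars.neg_one_le_find M ['<','-','>']
      omega
    rw [if_neg hfind, PySem.List.slice_to M h0, PySem.List.slice_from M (by omega)] at hc
    simp only [List.mem_cons, List.mem_append, List.mem_singleton, List.not_mem_nil, or_false] at hc
    have htake : ∀ x ∈ M.take (PySem.Chars.find M ['<','-','>']).toNat, x ∈ M :=
      fun x hx => List.mem_of_mem_take hx
    have hdrop : ∀ x ∈ M.drop (PySem.Chars.find M ['<','-','>'] + 3).toNat, x ∈ M :=
      fun x hx => List.mem_of_mem_drop hx
    simp only [List.mem_cons, List.mem_singleton]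
    tauto

lemma pv_transform_parenfree (M : List Char) (hM : pvParenFree M) :
    pvParenFree (pvTransform M) := by
  intro c hc
  rcases pv_transform_chars M c hc with h | h
  · simp only [List.mem_cons, List.not_mem_nil, or_false] at h
    rcases h with rfl | rfl | rfl | rfl | rfl <;> exact ⟨by decide, by decide⟩
  · exact hM c h

lemma pv_transform_no_open (M : List Char) (hM : '(' ∉ M) : '(' ∉ pvTransform M := by
  intro hc
  rcases pv_transform_chars M '(' hc with h | h
  · simp at h
  · exact hM h

lemma pv_bfold_parenfree (M : List Char) (hM : pvParenFree M) (top : List Char)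
    (rest : List (List Char)) :
    List.foldl pvBStep (top :: rest) M = (top ++ M) :: rest := by
  induction M generalizing top with
  | nil => simp
  | cons c t ih =>
    have hc := hM c List.mem_cons_self
    have hstep : pvBStep (top :: rest) c = (top ++ [c]) :: rest := by
      unfold pvBStep
      rw [if_neg hc.1, if_neg (by simp [hc.2])]
    rw [List.foldl_cons, hstep, ih (fun x hx => hM x (List.mem_cons_of_mem _ hx))]
    simp

lemma pv_bfold_noopen (M : List Char) (h : '(' ∉ M) (b : List Char) :
    List.foldl pvBStep [b] M = [b ++ M] := by
  induction M generalizing b with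
  | nil => simp
  | cons c t ih =>
    have hc : c ≠ '(' := fun e => h (e ▸ List.mem_cons_self)
    have hstep : pvBStep [b] c = [b ++ [c]] := by
      unfold pvBStep
      rw [if_neg hc, if_neg (by simp)]
    rw [List.foldl_cons, hstep, ih (fun hm => h (List.mem_cons_of_mem _ hm))]
    simp

lemma pv_bfold_ne_nil (cs : List Char) (st : List (List Char)) (h : st ≠ []) :
    List.foldl pvBStep st cs ≠ [] := by
  induction cs generalizing st with
  | nil => exact h
  | cons c t ih =>
    rw [List.foldl_cons]
    refine ih _ ?_
    rcases st with _ | ⟨a, st'⟩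
    · exact absurd rfl h
    · rcases st' with _ | ⟨b, st''⟩ <;> unfold pvBStep <;> split_ifs <;> simp

lemma pv_bfold_rewrite (L M R : List Char) (hM : pvParenFree M) :
    List.foldl pvBStep [[]] (L ++ '(' :: M ++ ')' :: R) =
    List.foldl pvBStep [[]] (L ++ pvTransform M ++ R) := by
  have hs : L ++ '(' :: M ++ ')' :: R = L ++ ('(' :: (M ++ ')' :: R)) := by simp
  rw [hs, List.foldl_append, List.foldl_append, List.foldl_append]
  obtain ⟨top, rest, hσ⟩ : ∃ top rest, List.foldl pvBStep [[]] L = top :: rest := by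
    rcases hst : List.foldl pvBStep [[]] L with _ | ⟨a, r⟩
    · exact absurd hst (pv_bfold_ne_nil L [[]] (by simp))
    · exact ⟨a, r, rfl⟩
  rw [hσ, List.foldl_cons]
  have hopen : pvBStep (top :: rest) '(' = [] :: top :: rest := by
    unfold pvBStep; rw [if_pos rfl]
  rw [hopen, List.foldl_append, pv_bfold_parenfree M hM [] (top :: rest), List.foldl_cons]
  have hclose : pvBStep (([] ++ M) :: top :: rest) ')' = (top ++ pvTransform M) :: rest := by
    unfold pvBStep
    rw [if_neg (by decide), if_pos (by simp)]
    simp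
  rw [hclose, pv_bfold_parenfree (pvTransform M) (pv_transform_parenfree M hM) top rest]

-- ---------- pvUnmatchedOpens lemmas ----------

lemma pv_ufold_parenfree (X : List Char) (h : pvParenFree X) (a : Nat) :
    X.foldl pvUStep a = a := by
  induction X generalizing a with
  | nil => rfl
  | cons c t ih =>
    have hc := h c List.mem_cons_self
    rw [List.foldl_cons]
    have hstep : pvUStep a c = a := by unfold pvUStep; rw [if_neg hc.1, if_neg hc.2]
    rw [hstep, ih (fun x hx => h x (List.mem_cons_of_mem _ hx))]

lemma pv_ufold_noclose (X : List Char) (h : ')' ∉ X) (a : Nat) :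
    a ≤ X.foldl pvUStep a := by
  induction X generalizing a with
  | nil => exact le_rfl
  | cons c t ih =>
    have hc : c ≠ ')' := fun e => h (e ▸ List.mem_cons_self)
    rw [List.foldl_cons]
    have hle : a ≤ pvUStep a c := by
      unfold pvUStep; split_ifs <;> omega
    exact le_trans hle (ih (fun hm => h (List.mem_cons_of_mem _ hm)) _)

lemma pv_ufold_noopen_zero (X : List Char) (h : '(' ∉ X) :
    X.foldl pvUStep 0 = 0 := by
  induction X with
  | nil => rfl
  | cons c t ih =>
    have hc : c ≠ '(' := fun e => h (e ▸ List.mem_cons_self)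
    rw [List.foldl_cons]
    have hstep : pvUStep 0 c = 0 := by
      unfold pvUStep; rw [if_neg hc]; split_ifs <;> rfl
    rw [hstep]
    exact ih (fun hm => h (List.mem_cons_of_mem _ hm))

lemma pv_u_rewrite (L M R : List Char) (hM : pvParenFree M) (a : Nat) :
    (L ++ pvTransform M ++ R).foldl pvUStep a = (L ++ '(' :: M ++ ')' :: R).foldl pvUStep a := by
  have hs : L ++ '(' :: M ++ ')' :: R = L ++ ('(' :: (M ++ ')' :: R)) := by simp
  rw [hs, List.foldl_append, List.foldl_append, List.foldl_append, List.foldl_cons]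
  rw [pv_ufold_parenfree (pvTransform M) (pv_transform_parenfree M hM)]
  have h1 : pvUStep (List.foldl pvUStep a L) '(' = List.foldl pvUStep a L + 1 := by
    unfold pvUStep; rw [if_pos rfl]
  rw [h1, List.foldl_append, pv_ufold_parenfree M hM, List.foldl_cons]
  have h2 : pvUStep (List.foldl pvUStep a L + 1) ')' = List.foldl pvUStep a L := by
    unfold pvUStep; rw [if_neg (by decide), if_pos rfl]; omega
  rw [h2]

lemma pv_parenfree_of_not_mem (M : List Char) (h1 : '(' ∉ M) (h2 : ')' ∉ M) : pvParenFree M :=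
  fun c hc => ⟨fun e => h1 (e ▸ hc), fun e => h2 (e ▸ hc)⟩

-- ---------- counting ----------

lemma pv_count_decomp (L M R : List Char) (hM : '(' ∉ M) :
    (L ++ '(' :: M ++ ')' :: R).count '(' = (L.count '(' + R.count '(') + 1 := by
  have hM0 : M.count '(' = 0 := List.count_eq_zero.mpr hM
  simp [List.count_append, hM0]
  omega

lemma pv_count_rewrite (L M R : List Char) (hM : '(' ∉ M) :
    (L ++ pvTransform M ++ R).count '(' = L.count '(' + R.count '(' := by
  have hT0 : (pvTransform M).count '(' = 0 := List.count_eq_zero.mpr (pv_transform_no_open M hM)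
  simp [List.count_append, hT0]

-- ---------- the two main inductions ----------

theorem pv_T1 : ∀ (n : Nat) (s : List Char), s.count '(' = n → s.foldl pvUStep 0 = 0 →
    pvALoop n s = pvCollapse (List.foldl pvBStep [[]] s) := by
  intro n
  induction n using Nat.strong_induction_on with
  | _ n ih =>
    intro s hcount hu
    cases n with
    | zero =>
      have hno : '(' ∉ s := List.count_eq_zero.mp hcount
      rw [pv_bfold_noopen s hno []]
      rfl
    | succ m =>
      have hmem : '(' ∈ s := List.count_pos_iff.mp (by omega)
      obtain ⟨L, T, rfl, hT⟩ := pv_split_last '(' s hmem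
      have hcT : ')' ∈ T := by
        by_contra hno
        have h1 : (1 : Nat) ≤ (L ++ '(' :: T).foldl pvUStep 0 := by
          rw [List.foldl_append, List.foldl_cons]
          have hstep : pvUStep (List.foldl pvUStep 0 L) '(' = List.foldl pvUStep 0 L + 1 := by
            unfold pvUStep; rw [if_pos rfl]
          rw [hstep]
          calc (1 : Nat) ≤ List.foldl pvUStep 0 L + 1 := by omega
            _ ≤ _ := pv_ufold_noclose T hno _
        omega
      obtain ⟨M, R, rfl, hMc⟩ := pv_split_first ')' T hcT
      have hM : '(' ∉ M := fun h => hT (List.mem_append.mpr (Or.inl h))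
      have hR : '(' ∉ R := fun h => hT (by simp [h])
      have hshape : L ++ '(' :: (M ++ ')' :: R) = L ++ '(' :: M ++ ')' :: R := by simp
      rw [hshape] at hcount hu ⊢
      have hPF : pvParenFree M := pv_parenfree_of_not_mem M hM hMc
      have hcount' : (L ++ pvTransform M ++ R).count '(' = m := by
        have h1 := pv_count_decomp L M R hM
        have h2 := pv_count_rewrite L M R hM
        omega
      have hu' : (L ++ pvTransform M ++ R).foldl pvUStep 0 = 0 := by
        rw [pv_u_rewrite L M R hPF]
        exact hu
      rw [pv_aloop_step m L M R hM hMc hR, pv_bfold_rewrite L M R hPF]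
      exact ih m (by omega) (L ++ pvTransform M ++ R) hcount' hu' 

theorem pv_T2 : ∀ (n : Nat) (s : List Char), s.count '(' = n →
    (s.drop 1).foldl pvUStep 0 = 0 → s.foldl pvUStep 0 ≠ 0 →
    ∃ X, pvALoop n s = '[' :: ']' :: X ∧
      pvCollapse (List.foldl pvBStep [[]] s) = '(' :: X := by
  intro n
  induction n using Nat.strong_induction_on with
  | _ n ih =>
    intro s hcount hdrop hu
    have hmem : '(' ∈ s := by
      by_contra hno
      exact hu (pv_ufold_noopen_zero s hno)
    obtain ⟨L, T, rfl, hT⟩ := pv_split_last '(' s hmem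
    by_cases hcT : ')' ∈ T
    · -- there is still a matched pair: one rewrite step on both sides
      obtain ⟨M, R, rfl, hMc⟩ := pv_split_first ')' T hcT
      have hM : '(' ∉ M := fun h => hT (List.mem_append.mpr (Or.inl h))
      have hR : '(' ∉ R := fun h => hT (by simp [h])
      have hPF : pvParenFree M := pv_parenfree_of_not_mem M hM hMc
      -- L ≠ [] : otherwise the whole string would be fully matched
      obtain ⟨l0, L', rfl⟩ : ∃ l0 L', L = l0 :: L' := by
        cases L with
        | nil =>
          exfalso
          apply hu
          have hstep : pvUStep 0 '(' = 1 := by unfold pvUStep; rw [if_pos rfl]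
          have hstep2 : pvUStep 1 ')' = 0 := by
            unfold pvUStep; rw [if_neg (by decide), if_pos rfl]
          simp only [List.nil_append, List.foldl_cons, List.foldl_append, hstep,
            pv_ufold_parenfree M hPF, hstep2]
          exact pv_ufold_noopen_zero R hR
        | cons a t => exact ⟨a, t, rfl⟩
      have hshape : (l0 :: L') ++ '(' :: (M ++ ')' :: R) = (l0 :: L') ++ '(' :: M ++ ')' :: R := by
        simp
      rw [hshape] at hcount hdrop hu ⊢
      cases n with
      | zero =>
        exfalso
        have h1 := pv_count_decomp (l0 :: L') M R hM
        omega
      | succ m =>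
        have hcount' : ((l0 :: L') ++ pvTransform M ++ R).count '(' = m := by
          have h1 := pv_count_decomp (l0 :: L') M R hM
          have h2 := pv_count_rewrite (l0 :: L') M R hM
          omega
        have hdrop' : (((l0 :: L') ++ pvTransform M ++ R).drop 1).foldl pvUStep 0 = 0 := by
          have he : ((l0 :: L') ++ pvTransform M ++ R).drop 1 = L' ++ pvTransform M ++ R := by
            simp
          have he2 : (((l0 :: L') ++ '(' :: M ++ ')' :: R).drop 1) = L' ++ '(' :: M ++ ')' :: R := by
            simp
          rw [he, pv_u_rewrite L' M R hPF]
          rw [he2] at hdrop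
          exact hdrop
        have hu' : ((l0 :: L') ++ pvTransform M ++ R).foldl pvUStep 0 ≠ 0 := by
          rw [pv_u_rewrite (l0 :: L') M R hPF]
          exact hu
        obtain ⟨X, hA, hB⟩ := ih m (by omega) ((l0 :: L') ++ pvTransform M ++ R) hcount' hdrop' hu'
        refine ⟨X, ?_, ?_⟩
        · rw [pv_aloop_step m (l0 :: L') M R hM hMc hR]
          exact hA
        · rw [pv_bfold_rewrite (l0 :: L') M R hPF]
          exact hB
    · -- no ')' after the last '(' : the final "[]" step
      obtain rfl : L = [] := by
        cases L with
        | nil => rfl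
        | cons a t =>
          exfalso
          apply absurd hdrop
          have h1 : ((a :: t ++ '(' :: T).drop 1) = t ++ '(' :: T := by simp
          rw [h1]
          have h2 : (1 : Nat) ≤ (t ++ '(' :: T).foldl pvUStep 0 := by
            rw [List.foldl_append, List.foldl_cons]
            have hstep : pvUStep (List.foldl pvUStep 0 t) '(' = List.foldl pvUStep 0 t + 1 := by
              unfold pvUStep; rw [if_pos rfl]
            rw [hstep]
            calc (1 : Nat) ≤ List.foldl pvUStep 0 t + 1 := by omega
              _ ≤ _ := pv_ufold_noclose T hcT _
          omega
      have hcount1 : n = 1 := by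
        have h0 : T.count '(' = 0 := List.count_eq_zero.mpr hT
        simp [h0] at hcount
        omega
      subst hcount1
      refine ⟨T, ?_, ?_⟩
      · exact pv_aloop_open_only 0 T hT hcT
      · simp only [List.nil_append, List.foldl_cons]
        have hopen : pvBStep [[]] '(' = [[], []] := by
          unfold pvBStep; rw [if_pos rfl]
        rw [hopen, pv_bfold_parenfree T (pv_parenfree_of_not_mem T hT hcT) [] [[]]]
        rfl

-- ---------- replace ----------

lemma pv_replace_single (a b : Char) (cs : List Char) :
    PySem.Chars.replace cs [a] [b] = cs.map (fun c => if c = a then b else c) := by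
  have go_aux : ∀ (l acc : List Char) (fuel : Nat), l.length ≤ fuel →
      PySem.Chars.replace.go [a] [b] fuel l acc =
        acc.reverse ++ l.map (fun c => if c = a then b else c) := by
    intro l
    induction l with
    | nil =>
      intro acc fuel _
      cases fuel <;> simp [PySem.Chars.replace.go]
    | cons c t ih =>
      intro acc fuel hlen
      cases fuel with
      | zero => simp at hlen
      | succ f =>
        have hstep : PySem.Chars.replace.go [a] [b] (f + 1) (c :: t) acc =
            if [a].isPrefixOf (c :: t) then
              PySem.Chars.replace.go [a] [b] f ((c :: t).drop 1) ([b].reverse ++ acc)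
            else PySem.Chars.replace.go [a] [b] f t (c :: acc) := by
          simp [PySem.Chars.replace.go]
        rw [hstep]
        by_cases hac : a = c
        · rw [if_pos (by simp [List.isPrefixOf, hac])]
          have he : ([b].reverse ++ acc) = b :: acc := by simp
          rw [List.drop_succ_cons, List.drop_zero, he, ih (b :: acc) f (by simp at hlen; omega)]
          simp [hac]
        · rw [if_neg (by simp [List.isPrefixOf]; exact hac)]
          rw [ih (c :: acc) f (by simp at hlen; omega)]
          simp [Ne.symm hac]
  unfold PySem.Chars.replace
  rw [if_neg (by simp)]
  exact go_aux cs [] cs.length le_rfl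

lemma pv_repl_eq_map (cs : List Char) :
    PySem.Chars.replace (PySem.Chars.replace cs ['['] ['(']) [']'] [')'] = cs.map pvReplFun := by
  rw [pv_replace_single, pv_replace_single, List.map_map]
  refine List.map_congr_left ?_
  intro c _
  simp only [Function.comp, pvReplFun]
  by_cases h1 : c = '['
  · subst h1; rfl
  · by_cases h2 : c = ']'
    · subst h2; rfl
    · simp [h1, h2]

-- a string with matched tail but an unmatched '(' somewhere must start with '('
lemma pv_head_open (cs : List Char) (hpre : (cs.drop 1).foldl pvUStep 0 = 0)
    (hu : cs.foldl pvUStep 0 ≠ 0) : cs.take 1 = ['('] := by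
  cases cs with
  | nil => exact absurd rfl hu
  | cons c t =>
    by_cases hc : c = '('
    · simp [hc]
    · exfalso
      apply hu
      rw [List.foldl_cons]
      have hstep : pvUStep 0 c = 0 := by
        unfold pvUStep; rw [if_neg hc]; split_ifs <;> rfl
      rw [hstep]
      simpa using hpre

-- ===== VERDICT =====
theorem eliminateBiconditional_spec : Claim_unchanged_eliminateBiconditional := by
  intro s _ hpre hnd
  have hu : s.toList.foldl pvUStep 0 = 0 := by
    by_contra h
    exact hnd ⟨pv_head_open s.toList hpre h, h⟩
  unfold eliminateBiconditional eliminateBiconditional_alt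
  rw [pv_T1 (s.toList.count '(') s.toList rfl hu]
theorem eliminateBiconditional_changed : Claim_changed_eliminateBiconditional := by
  unfold Claim_changed_eliminateBiconditional; decide
theorem eliminateBiconditional_tight : Claim_exact_eliminateBiconditional := by
  intro s _ hpre hd
  obtain ⟨X, hA, hB⟩ := pv_T2 (s.toList.count '(') s.toList rfl hpre hd.2
  simp only [eliminateBiconditional, eliminateBiconditional_alt, hA, hB, pv_repl_eq_map]
  intro hcontra
  have := congrArg (fun t => t.toList.length) hcontra
  simp [pvReplFun] at this
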